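-- pv_equiv track=rewrite | github.com/lumenalux/project-euler | problem_043_substring_divisibility.py | merge_triples
-- ===== SOURCE A (Python) =====
-- from itertools import permutations, product
--
-- def merge_triples(sequences: list[str], triples: list[str]) -> list[str]:
--     new_sequences = []
--     for sequence, triple in product(sequences, triples):
--         if sequence[:2] != triple[-2:]:
--             continue
--
--         new_sequence = triple[:1] + sequence
--         if len(new_sequence) == len(set(new_sequence)):
--             new_sequences.append(new_sequence)
--
--     return new_sequences
-- ===== SOURCE B (Python) =====
-- def merge_triples(sequences: list[str], triples: list[str]) -> list[str]:
--     buckets = {}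
--     for triple in triples:
--         buckets.setdefault(triple[-2:], []).append(triple)
--
--     new_sequences = []
--     for sequence in sequences:
--         for triple in buckets.get(sequence[:2], []):
--             new_sequence = triple[:1] + sequence
--             if len(new_sequence) == len(set(new_sequence)):
--                 new_sequences.append(new_sequence)
--     return new_sequences
-- ===== Notes on version B (the rewrite author's own statement) =====
-- stated objective: faster
-- what changed: A scans every sequence-triple pair; B buckets triples once in a dict keyed by their last two characters and, per sequence, iterates only the matching bucket.
import Mathlib
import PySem

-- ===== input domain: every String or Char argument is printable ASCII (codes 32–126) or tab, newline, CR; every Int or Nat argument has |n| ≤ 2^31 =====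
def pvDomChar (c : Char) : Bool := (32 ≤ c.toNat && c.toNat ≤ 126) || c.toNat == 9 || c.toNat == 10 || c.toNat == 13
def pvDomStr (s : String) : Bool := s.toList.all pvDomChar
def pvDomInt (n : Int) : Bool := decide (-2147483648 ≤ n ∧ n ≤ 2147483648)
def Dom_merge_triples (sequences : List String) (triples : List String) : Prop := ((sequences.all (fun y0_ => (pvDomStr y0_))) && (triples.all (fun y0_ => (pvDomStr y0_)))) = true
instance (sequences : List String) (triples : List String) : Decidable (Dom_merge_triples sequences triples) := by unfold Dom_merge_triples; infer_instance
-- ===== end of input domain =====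

-- B replaces A's scan of all sequence×triple pairs by a dict of triples bucketed on
-- their last two characters; per sequence only the matching bucket is visited.

-- ===== PORT A =====
def merge_triples (sequences : List String) (triples : List String) : List String :=
  -- for sequence, triple in product(sequences, triples): ...
  (sequences.flatMap (fun s => triples.map (fun t => (s, t)))).foldl
    (fun new_sequences p =>
      if PySem.Str.slice p.1 none (some 2) ≠ PySem.Str.slice p.2 (some (-2)) none then
        new_sequences
      else
        let new_sequence := PySem.Str.slice p.2 none (some 1) ++ p.1
        if PySem.Str.len new_sequence == PySem.Set.len (PySem.Set.ofList new_sequence.toList) then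
          new_sequences ++ [new_sequence]
        else new_sequences)
    []

-- ===== PORT B =====
def merge_triples_alt (sequences : List String) (triples : List String) : List String :=
  -- buckets.setdefault(triple[-2:], []).append(triple)
  let buckets := triples.foldl
    (fun d t =>
      let k := PySem.Str.slice t (some (-2)) none
      d.insert k ((d.getD k []) ++ [t]))
    PySem.Dict.empty
  sequences.foldl
    (fun new_sequences s =>
      (buckets.getD (PySem.Str.slice s none (some 2)) []).foldl
        (fun new_sequences t =>
          let new_sequence := PySem.Str.slice t none (some 1) ++ s
          if PySem.Str.len new_sequence == PySem.Set.len (PySem.Set.ofList new_sequence.toList) then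
            new_sequences ++ [new_sequence]
          else new_sequences)
        new_sequences)
    []

-- ===== PRECONDITION & SPEC =====
def Spec_merge_triples (sequences : List String) (triples : List String) (out : List String) : Prop := out = merge_triples_alt sequences triples
instance (sequences : List String) (triples : List String) (out : List String) : Decidable (Spec_merge_triples sequences triples out) := by unfold Spec_merge_triples; infer_instance

-- ===== CLAIM (what is proved, stated in full; the proofs are below) =====
def Claim_equal_merge_triples : Prop := ∀ (sequences : List String) (triples : List String), Dom_merge_triples sequences triples → Spec_merge_triples sequences triples (merge_triples sequences triples)

-- ===== LEMMAS AND PROOFS =====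

-- the per-(sequence, triple) acceptance test and appended string
def pvCond (s t : String) : Bool :=
  let ns := PySem.Str.slice t none (some 1) ++ s
  PySem.Str.len ns == PySem.Set.len (PySem.Set.ofList ns.toList)

def pvOut (s t : String) : String := PySem.Str.slice t none (some 1) ++ s

-- the buckets dict: bucket of c = triples whose last two chars are c, in order
theorem pvBucket_getD (l : List String) (d : PySem.Dict String (List String)) (c : String) :
    (l.foldl (fun d t =>
        let k := PySem.Str.slice t (some (-2)) none
        d.insert k ((d.getD k []) ++ [t])) d).getD c []
    = d.getD c [] ++ l.filter (fun t => decide (c = PySem.Str.slice t (some (-2)) none)) := by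
  induction l generalizing d with
  | nil => simp
  | cons t l ih =>
    simp only [List.foldl_cons, List.filter_cons, ih, PySem.Dict.getD_insert]
    by_cases h : c = PySem.Str.slice t (some (-2)) none
    · simp [h]
    · simp [h]

-- A's inner pass over triples, for one sequence s
theorem pvInnerA (s : String) (triples : List String) (acc : List String) :
    triples.foldl (fun new_sequences t =>
      if PySem.Str.slice s none (some 2) ≠ PySem.Str.slice t (some (-2)) none then
        new_sequences
      else
        let new_sequence := PySem.Str.slice t none (some 1) ++ s
        if PySem.Str.len new_sequence == PySem.Set.len (PySem.Set.ofList new_sequence.toList) then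
          new_sequences ++ [new_sequence]
        else new_sequences) acc
    = acc ++ ((triples.filter (fun t =>
        decide (PySem.Str.slice s none (some 2) = PySem.Str.slice t (some (-2)) none)
          && pvCond s t)).map (pvOut s)) := by
  rw [← PySem.List.foldl_append_if]
  apply PySem.List.foldl_congr_mem'
  intro t _ acc
  by_cases h : PySem.Str.slice s none (some 2) = PySem.Str.slice t (some (-2)) none
  · simp only [h, ne_eq, not_true_eq_false, if_false, decide_true, Bool.true_and]
    by_cases hc : pvCond s t <;>
      simp_all [pvCond, pvOut]
  · simp [h]

-- B's inner pass over one bucket, for one sequence s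
theorem pvInnerB (s : String) (l : List String) (acc : List String) :
    l.foldl (fun new_sequences t =>
      let new_sequence := PySem.Str.slice t none (some 1) ++ s
      if PySem.Str.len new_sequence == PySem.Set.len (PySem.Set.ofList new_sequence.toList) then
        new_sequences ++ [new_sequence]
      else new_sequences) acc
    = acc ++ (l.filter (pvCond s)).map (pvOut s) := by
  rw [← PySem.List.foldl_append_if]
  apply PySem.List.foldl_congr_mem'
  intro t _ acc
  by_cases hc : pvCond s t <;> simp_all [pvCond, pvOut]

-- ===== VERDICT (by name: the statement is the Claim_ definition above) =====
theorem merge_triples_spec : Claim_equal_merge_triples := by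
  intro sequences triples _
  unfold Spec_merge_triples merge_triples merge_triples_alt
  rw [List.foldl_flatMap]
  simp only [List.foldl_map, pvBucket_getD, PySem.Dict.getD_empty, List.nil_append]
  apply PySem.List.foldl_congr_mem'
  intro s _ acc
  have hf : List.filter (fun t =>
        decide (PySem.Str.slice s none (some 2) = PySem.Str.slice t (some (-2)) none)
          && pvCond s t) triples
      = List.filter (fun t => pvCond s t
          && decide (PySem.Str.slice s none (some 2) = PySem.Str.slice t (some (-2)) none)) triples :=
    List.filter_congr (fun t _ => Bool.and_comm ..)
  rw [pvInnerA, hf]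
  conv_rhs => rw [pvInnerB, List.filter_filter]
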